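-- pv_equiv track=rewrite | github.com/MaxLyonel/Proyecto---319 | Python/Primer Ejercicio Python/PrimerEjercicio/aplicacion/views.py | fibonacci_4
-- ===== SOURCE A (Python) =====
-- def fibonacci_4(n):
--     fibo = []
--     fibo.append(1)
--     fibo.append(1)
--     fibo.append(1)
--     fibo.append(1)
--     for i in range(4, n):
--         fibo.append(fibo[i - 1] + fibo[i - 2] + fibo[i - 3] + fibo[i - 4])
--     return fibo
-- ===== SOURCE B (Python) =====
-- def fibonacci_4(n):
--     # Telescoped recurrence: t(i) = t(i-1)+t(i-2)+t(i-3)+t(i-4) implies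
--     # t(i) = 2*t(i-1) - t(i-5), so after seeding the fifth term (4) each
--     # new term needs only one doubling and one subtraction.
--     fibo = [1, 1, 1, 1]
--     if n > 4:
--         fibo.append(4)
--         for _ in range(5, n):
--             fibo.append(2 * fibo[-1] - fibo[-5])
--     return fibo
-- ===== Notes on version B (the rewrite author's own statement) =====
-- stated objective: alternative
-- what changed: uses the telescoped recurrence t(i) = 2*t(i-1) - t(i-5) (valid because t(i-1) is itself the sum of the four terms before it) with an explicitly seeded fifth term, so each new term is computed from two values by a doubling and a subtraction instead of summing the previous four
import Mathlib
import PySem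

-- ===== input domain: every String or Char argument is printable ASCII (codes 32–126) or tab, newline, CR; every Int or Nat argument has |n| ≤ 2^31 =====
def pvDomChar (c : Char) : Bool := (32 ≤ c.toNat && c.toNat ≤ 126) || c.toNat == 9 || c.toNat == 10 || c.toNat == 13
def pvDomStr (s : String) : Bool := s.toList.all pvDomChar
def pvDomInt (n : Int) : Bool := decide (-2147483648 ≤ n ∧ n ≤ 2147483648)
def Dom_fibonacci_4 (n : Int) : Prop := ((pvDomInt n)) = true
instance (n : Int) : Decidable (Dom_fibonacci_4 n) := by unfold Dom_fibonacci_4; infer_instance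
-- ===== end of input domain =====

-- B replaces the sum-of-four recurrence by the telescoped recurrence t(i) = 2*t(i-1) - t(i-5)
-- with an explicitly seeded fifth term (objective: alternative, same cost).
-- ===== PORT A =====
-- faithful port of A: grow the list, each new term read back by indexing; the
-- indices i-1..i-4 are always in range (i = current length), so Python never raises
-- and pyGetD's default 0 is never used.
def fibonacci_4 (n : Int) : List Int :=
  (PySem.List.pyRange 4 n 1).foldl
    (fun fibo i =>
      fibo ++ [PySem.List.pyGetD fibo (i - 1) 0 + PySem.List.pyGetD fibo (i - 2) 0 +
               PySem.List.pyGetD fibo (i - 3) 0 + PySem.List.pyGetD fibo (i - 4) 0])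
    [1, 1, 1, 1]

-- ===== PORT B =====
-- faithful port of Source B: seed the fifth term 4, then each new term is
-- 2*fibo[-1] - fibo[-5] (negative Python indexing → pyGetD with negative index).
def fibonacci_4_alt (n : Int) : List Int :=
  let fibo : List Int := [1, 1, 1, 1]
  if 4 < n then
    (PySem.List.pyRange 5 n 1).foldl
      (fun fibo _ =>
        fibo ++ [2 * PySem.List.pyGetD fibo (-1) 0 - PySem.List.pyGetD fibo (-5) 0])
      (fibo ++ [4])
  else fibo

-- ===== PRECONDITION & SPEC =====
def Spec_fibonacci_4 (n : Int) (out : List Int) : Prop := out = fibonacci_4_alt n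
instance (n : Int) (out : List Int) : Decidable (Spec_fibonacci_4 n out) := by unfold Spec_fibonacci_4; infer_instance

-- ===== CLAIM (what is proved, stated in full; the proofs are below) =====
def Claim_equal_fibonacci_4 : Prop := ∀ (n : Int), Dom_fibonacci_4 n → Spec_fibonacci_4 n (fibonacci_4 n)

-- ===== LEMMAS AND PROOFS =====

-- proof-side helper: the k terms A's loop generates from rolling window (a, b, c, d)
def fib4Go : Nat → Int → Int → Int → Int → List Int
  | 0, _, _, _, _ => []
  | Nat.succ k, a, b, c, d => (a + b + c + d) :: fib4Go k b c d (a + b + c + d)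

-- proof-side helper: the k terms B's loop generates from the last five terms (a, b, c, d, e)
def fib4Go2 : Nat → Int → Int → Int → Int → Int → List Int
  | 0, _, _, _, _, _ => []
  | Nat.succ k, a, b, c, d, e => (2 * e - a) :: fib4Go2 k b c d e (2 * e - a)

-- indexing the state L ++ xs at absolute position len(L) + k
theorem fib4_getD (L xs : List Int) (k : Nat) (i : Int) (h : i = (L.length : Int) + (k : Int)) :
    PySem.List.pyGetD (L ++ xs) i 0 = xs.getD k 0 := by
  subst h
  simp [PySem.List.pyGetD, PySem.List.pyGet?_append_right, List.getD]

-- A's loop: the list always ends in the four rolling values, and the appended term is their sum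
theorem fib4_loop (k : Nat) : ∀ (L : List Int) (a b c d : Int),
    (PySem.List.pyRange ((L.length : Int) + 4) ((L.length : Int) + 4 + k) 1).foldl
      (fun fibo i =>
        fibo ++ [PySem.List.pyGetD fibo (i - 1) 0 + PySem.List.pyGetD fibo (i - 2) 0 +
                 PySem.List.pyGetD fibo (i - 3) 0 + PySem.List.pyGetD fibo (i - 4) 0])
      (L ++ [a, b, c, d])
    = L ++ a :: b :: c :: d :: fib4Go k a b c d := by
  induction k with
  | zero =>
      intro L a b c d
      rw [PySem.List.pyRange_one_eq_nil (by omega)]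
      simp [fib4Go]
  | succ k ih =>
      intro L a b c d
      rw [PySem.List.pyRange_one_cons (by push_cast; omega)]
      simp only [List.foldl_cons]
      rw [fib4_getD L [a, b, c, d] 3 _ (by push_cast; ring),
          fib4_getD L [a, b, c, d] 2 _ (by push_cast; ring),
          fib4_getD L [a, b, c, d] 1 _ (by push_cast; ring),
          fib4_getD L [a, b, c, d] 0 _ (by push_cast; ring)]
      have harg : (L ++ [a, b, c, d]) ++
            [[a, b, c, d].getD 3 0 + [a, b, c, d].getD 2 0 +
             [a, b, c, d].getD 1 0 + [a, b, c, d].getD 0 0]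
          = (L ++ [a]) ++ [b, c, d, d + c + b + a] := by simp
      have hlo : (L.length : Int) + 4 + 1 = (((L ++ [a]).length : Int) + 4) := by
        simp; ring
      have hhi : (L.length : Int) + 4 + ((k + 1 : Nat) : Int)
          = (((L ++ [a]).length : Int) + 4 + (k : Int)) := by
        push_cast; simp; ring
      rw [harg, hlo, hhi, ih (L ++ [a]) b c d (d + c + b + a)]
      simp [fib4Go]
      ring_nf
      exact ⟨trivial, trivial⟩

-- A in closed form over fib4Go
theorem fibA_eq (n : Int) : fibonacci_4 n = [1, 1, 1, 1] ++ fib4Go (n - 4).toNat 1 1 1 1 := by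
  unfold fibonacci_4
  by_cases h : n ≤ 4
  · rw [PySem.List.pyRange_one_eq_nil h, show (n - 4).toNat = 0 by omega]
    simp [fib4Go]
  · have key := fib4_loop (n - 4).toNat [] 1 1 1 1
    simp only [List.length_nil, Nat.cast_zero, zero_add, List.nil_append] at key
    conv_lhs => rw [show n = 4 + (((n - 4).toNat : Nat) : Int) by omega]
    rw [key]
    simp

-- fibo[-5] of a list ending in five known values is the first of them
theorem fibB_getD_neg5 (L : List Int) (a b c d e : Int) :
    PySem.List.pyGetD (L ++ [a, b, c, d, e]) (-5) 0 = a := by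
  rw [PySem.List.pyGetD_neg_ofNat _ 5 0 (by omega) (by simp)]
  simp

-- B's loop: the list always ends in the last five terms; each step appends 2*e - a
theorem fibB_loop (l : List Int) : ∀ (L : List Int) (a b c d e : Int),
    l.foldl
      (fun fibo _ =>
        fibo ++ [2 * PySem.List.pyGetD fibo (-1) 0 - PySem.List.pyGetD fibo (-5) 0])
      (L ++ [a, b, c, d, e])
    = L ++ a :: b :: c :: d :: e :: fib4Go2 l.length a b c d e := by
  induction l with
  | nil => intro L a b c d e; simp [fib4Go2]
  | cons x l ih =>
      intro L a b c d e
      simp only [List.foldl_cons, List.length_cons]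
      rw [show L ++ [a, b, c, d, e] = (L ++ [a, b, c, d]) ++ [e] by simp,
          PySem.List.pyGetD_neg_one_append_singleton,
          show (L ++ [a, b, c, d]) ++ [e] = L ++ [a, b, c, d, e] by simp,
          fibB_getD_neg5]
      have harg : (L ++ [a, b, c, d, e]) ++ [2 * e - a]
          = (L ++ [a]) ++ [b, c, d, e, 2 * e - a] := by simp
      rw [harg, ih (L ++ [a]) b c d e (2 * e - a)]
      simp [fib4Go2]

-- the telescoped recurrence generates A's terms: if e = a+b+c+d then
-- the next sum b+c+d+e equals 2*e - a, and the invariant is preserved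
theorem fib4Go_eq_go2 (k : Nat) : ∀ (a b c d e : Int), e = a + b + c + d →
    fib4Go k b c d e = fib4Go2 k a b c d e := by
  induction k with
  | zero => intro a b c d e _; rfl
  | succ k ih =>
      intro a b c d e h
      simp only [fib4Go, fib4Go2]
      have hx : b + c + d + e = 2 * e - a := by omega
      rw [hx, ih b c d e (2 * e - a) (by omega)]

-- ===== VERDICT (by name: the statement is the Claim_ definition above) =====
theorem fibonacci_4_spec : Claim_equal_fibonacci_4 := by
  intro n _
  show fibonacci_4 n = fibonacci_4_alt n
  rw [fibA_eq]
  unfold fibonacci_4_alt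
  by_cases h : 4 < n
  · rw [if_pos h]
    have hk : (n - 4).toNat = (n - 5).toNat + 1 := by omega
    have key := fibB_loop (PySem.List.pyRange 5 n 1) [] 1 1 1 1 4
    simp only [PySem.List.length_pyRange_one, List.nil_append] at key
    rw [show ([1, 1, 1, 1] : List Int) ++ [(4 : Int)] = [1, 1, 1, 1, 4] by simp, key, hk]
    simp [fib4Go, fib4Go_eq_go2 (n - 5).toNat 1 1 1 1 4 (by omega)]
  · rw [if_neg h, show (n - 4).toNat = 0 by omega]
    simp [fib4Go]
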